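-- pv_equiv track=rewrite | github.com/pypi-data/pypi-mirror-395 | packages/moltres/moltres-0.23.2-py3-none-any.whl/moltres/utils/exceptions.py | _suggest_column_name
-- ===== SOURCE A (Python) =====
-- from typing import Optional, Sequence
--
-- def _levenshtein_distance(s1: str, s2: str) -> int:
--     """Calculate Levenshtein distance between two strings."""
--     if len(s1) < len(s2):
--         return _levenshtein_distance(s2, s1)
--     if len(s2) == 0:
--         return len(s1)
--     previous_row = list(range(len(s2) + 1))
--     for i, c1 in enumerate(s1):
--         current_row = [i + 1]
--         for j, c2 in enumerate(s2):
--             insertions = previous_row[j + 1] + 1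
--             deletions = current_row[j] + 1
--             substitutions = previous_row[j] + (c1 != c2)
--             current_row.append(min(insertions, deletions, substitutions))
--         previous_row = current_row
--     return previous_row[-1]
--
-- def _suggest_column_name(column_name: str, available_columns: Sequence[str]) -> str:
--     """Suggest similar column names when a column is not found."""
--     if not available_columns:
--         return f"Column '{column_name}' does not exist. No columns are available in this context."
--     # Calculate similarity scores
--     scores = [
--         (col, _levenshtein_distance(column_name.lower(), col.lower())) for col in available_columns
--     ]
--     scores.sort(key=lambda x: x[1])
--     # Get top 3 suggestions
--     suggestions = [col for col, _ in scores[:3] if scores[0][1] <= len(column_name)]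
--     if suggestions:
--         if len(suggestions) == 1:
--             return f"Column '{column_name}' does not exist. Did you mean: '{suggestions[0]}'?"
--         else:
--             suggestions_str = ", ".join(f"'{s}'" for s in suggestions)
--             return f"Column '{column_name}' does not exist. Did you mean one of: {suggestions_str}?"
--     return (
--         f"Column '{column_name}' does not exist. "
--         f"Available columns: {', '.join(available_columns[:10])}"
--         + ("..." if len(available_columns) > 10 else "")
--     )
-- ===== SOURCE B (Python) =====
-- from typing import Sequence
--
--
-- def _levenshtein_distance(s1: str, s2: str) -> int:
--     """Calculate Levenshtein distance between two strings."""
--     if len(s1) < len(s2):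
--         return _levenshtein_distance(s2, s1)
--     if len(s2) == 0:
--         return len(s1)
--     previous_row = list(range(len(s2) + 1))
--     for i, c1 in enumerate(s1):
--         current_row = [i + 1]
--         for j, c2 in enumerate(s2):
--             insertions = previous_row[j + 1] + 1
--             deletions = current_row[j] + 1
--             substitutions = previous_row[j] + (c1 != c2)
--             current_row.append(min(insertions, deletions, substitutions))
--         previous_row = current_row
--     return previous_row[-1]
--
--
-- def _extract_min(pairs):
--     """Return (first pair with minimal distance, remaining pairs in order)."""
--     head, tail = pairs[0], pairs[1:]
--     if not tail:
--         return head, []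
--     m, rest = _extract_min(tail)
--     if m[1] < head[1]:
--         return m, [head] + rest
--     return head, tail
--
--
-- def _suggest_column_name(column_name: str, available_columns: Sequence[str]) -> str:
--     """Suggest similar column names: selection by repeated stable min-extraction (no sort)."""
--     base = "Column '" + column_name + "' does not exist. "
--     if not available_columns:
--         return base + "No columns are available in this context."
--     target = column_name.lower()
--     pairs = [(col, _levenshtein_distance(target, col.lower())) for col in available_columns]
--     picks = []
--     for _ in range(3):
--         if pairs:
--             m, pairs = _extract_min(pairs)
--             picks.append(m)
--     if picks[0][1] <= len(column_name):
--         if len(picks) == 1: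
--             return base + "Did you mean: '%s'?" % picks[0][0]
--         return base + "Did you mean one of: %s?" % ", ".join("'%s'" % c for c, _ in picks)
--     suffix = "..." if len(available_columns) > 10 else ""
--     return base + "Available columns: " + ", ".join(available_columns[:10]) + suffix
-- ===== Notes on version B (the rewrite author's own statement) =====
-- stated objective: alternative
-- what changed: B replaces A's build-all-scores / full stable sort / slice[:3] with selection: a recursive stable min-extraction helper applied three times to the (column, distance) pairs, and it assembles every message from a shared prefix instead of full format strings.
import Mathlib
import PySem

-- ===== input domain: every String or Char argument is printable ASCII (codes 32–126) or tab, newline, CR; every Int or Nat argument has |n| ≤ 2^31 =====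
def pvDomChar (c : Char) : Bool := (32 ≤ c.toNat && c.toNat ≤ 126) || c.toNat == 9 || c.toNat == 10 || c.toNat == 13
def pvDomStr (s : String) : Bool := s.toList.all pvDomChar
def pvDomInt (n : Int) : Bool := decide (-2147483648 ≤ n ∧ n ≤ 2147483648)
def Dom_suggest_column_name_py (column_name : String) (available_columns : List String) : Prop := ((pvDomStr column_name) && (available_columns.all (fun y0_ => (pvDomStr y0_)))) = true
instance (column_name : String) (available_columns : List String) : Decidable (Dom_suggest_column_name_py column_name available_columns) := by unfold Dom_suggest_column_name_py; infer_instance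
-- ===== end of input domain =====

-- B: selection by repeated stable min-extraction of the 3 closest columns instead of A's full sort + slice (alternative algorithm, same result).

-- ===== PORT A =====
-- _levenshtein_distance, shared verbatim by both Python versions (B keeps it unchanged)
def levenshtein (s1 s2 : List Char) : Int :=
  if s1.length < s2.length then levenshtein s2 s1
  else if s2.length = 0 then (s1.length : Int)
  else
    let previous_row : List Int := PySem.List.pyRange 0 (s2.length + 1) 1
    let final := (PySem.List.enumerate s1).foldl (fun previous_row ic =>
      let i := ic.1; let c1 := ic.2
      let current_row : List Int :=
        (PySem.List.enumerate s2).foldl (fun current_row jc =>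
          let j := jc.1; let c2 := jc.2
          let insertions := PySem.List.pyGetD previous_row (j + 1) 0 + 1
          let deletions := PySem.List.pyGetD current_row j 0 + 1
          let substitutions := PySem.List.pyGetD previous_row j 0 + (if c1 ≠ c2 then 1 else 0)
          current_row ++ [min insertions (min deletions substitutions)]) [i + 1]
      current_row) previous_row
    PySem.List.pyGetD final (-1) 0
termination_by s2.length
decreasing_by omega

def suggest_column_name_py (column_name : String) (available_columns : List String) : String :=
  if available_columns = [] then
    "Column '" ++ column_name ++ "' does not exist. No columns are available in this context."
  else
    let scores : List (String × Int) := available_columns.map (fun col =>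
      (col, levenshtein (PySem.Chars.lower column_name.toList) (PySem.Chars.lower col.toList)))
    let scores := PySem.List.sorted scores (fun x => x.2)
    let suggestions : List String :=
      ((PySem.List.slice scores none (some 3)).filter
        (fun _ => decide ((PySem.List.pyGetD scores 0 ("", 0)).2 ≤ PySem.Str.len column_name))).map
        (fun x => x.1)
    if suggestions ≠ [] then
      if suggestions.length = 1 then
        "Column '" ++ column_name ++ "' does not exist. Did you mean: '" ++
          PySem.List.pyGetD suggestions 0 "" ++ "'?"
      else
        "Column '" ++ column_name ++ "' does not exist. Did you mean one of: " ++
          PySem.Str.join ", " (suggestions.map (fun s => "'" ++ s ++ "'")) ++ "?"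
    else
      "Column '" ++ column_name ++ "' does not exist. Available columns: " ++
        PySem.Str.join ", " (PySem.List.slice available_columns none (some 10)) ++
        (if available_columns.length > 10 then "..." else "")

-- ===== PORT B =====
-- _extract_min: first pair with minimal distance plus the remaining pairs in order
-- (Python indexes pairs[0]/pairs[1:]; here the nonempty list arrives as head + tail)
def extractMin (head : String × Int) : List (String × Int) → (String × Int) × List (String × Int)
  | [] => (head, [])
  | t0 :: ts =>
    let mr := extractMin t0 ts
    if mr.1.2 < head.2 then (mr.1, head :: mr.2) else (head, t0 :: ts)

def suggest_column_name_py_alt (column_name : String) (available_columns : List String) : String :=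
  let base := "Column '" ++ column_name ++ "' does not exist. "
  if available_columns = [] then base ++ "No columns are available in this context."
  else
    let target := PySem.Chars.lower column_name.toList
    let pairs : List (String × Int) := available_columns.map (fun col =>
      (col, levenshtein target (PySem.Chars.lower col.toList)))
    let st := (PySem.List.pyRange 0 3 1).foldl     -- for _ in range(3)
      (fun (st : List (String × Int) × List (String × Int)) _ =>
        match st.2 with
        | [] => st
        | h :: t => let mr := extractMin h t; (st.1 ++ [mr.1], mr.2)) ([], pairs)
    let picks := st.1
    if (PySem.List.pyGetD picks 0 ("", 0)).2 ≤ PySem.Str.len column_name then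
      if picks.length = 1 then
        base ++ "Did you mean: '" ++ (PySem.List.pyGetD picks 0 ("", 0)).1 ++ "'?"
      else
        base ++ "Did you mean one of: " ++
          PySem.Str.join ", " (picks.map (fun c => "'" ++ c.1 ++ "'")) ++ "?"
    else
      let suffix := if available_columns.length > 10 then "..." else ""
      base ++ "Available columns: " ++
        PySem.Str.join ", " (PySem.List.slice available_columns none (some 10)) ++ suffix

-- ===== PRECONDITION & SPEC =====
def Spec_suggest_column_name_py (column_name : String) (available_columns : List String) (out : String) : Prop := out = suggest_column_name_py_alt column_name available_columns
instance (column_name : String) (available_columns : List String) (out : String) : Decidable (Spec_suggest_column_name_py column_name available_columns out) := by unfold Spec_suggest_column_name_py; infer_instance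

-- ===== CLAIM (what is proved, stated in full; the proofs are below) =====
def Claim_equal_suggest_column_name_py : Prop := ∀ (column_name : String) (available_columns : List String), Dom_suggest_column_name_py column_name available_columns → Spec_suggest_column_name_py column_name available_columns (suggest_column_name_py column_name available_columns)

-- ===== LEMMAS AND PROOFS =====

-- the selection step for the extraction loop
def selStep (st : List (String × Int) × List (String × Int)) :
    List (String × Int) × List (String × Int) :=
  match st.2 with
  | [] => st
  | h :: t => let mr := extractMin h t; (st.1 ++ [mr.1], mr.2)

-- extractMin over a list extended on the right
theorem extractMin_append (h x : String × Int) (ys : List (String × Int)) :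
    extractMin h (ys ++ [x]) =
      if x.2 < (extractMin h ys).1.2 then (x, h :: ys)
      else ((extractMin h ys).1, (extractMin h ys).2 ++ [x]) := by
  induction ys generalizing h with
  | nil => simp [extractMin]
  | cons y ys ih =>
    simp only [List.cons_append, extractMin, ih y]
    rcases hx : extractMin y ys with ⟨m0, r0⟩
    by_cases h1 : x.2 < m0.2 <;> by_cases h2 : m0.2 < h.2 <;>
      simp [h1, h2] <;>
      first
        | rfl
        | (split_ifs <;> simp_all <;> omega)
        | (intro h3; exact absurd h3 (by omega))

-- appending one element to a stable sort inserts it before the first strictly greater key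
theorem sorted_snoc (x : String × Int) (xs : List (String × Int)) :
    PySem.List.sorted (xs ++ [x]) (fun p => p.2) =
      PySem.List.insertBy (fun a b => decide (a.2 < b.2)) x
        (PySem.List.sorted xs (fun p => p.2)) := by
  rw [PySem.List.sorted_eq_foldl_insertBy, PySem.List.sorted_eq_foldl_insertBy,
    List.foldl_append, List.foldl_cons, List.foldl_nil]

-- the stable sort is head-min extraction followed by the stable sort of the rest
theorem sorted_eq_extractMin (h : String × Int) (t : List (String × Int)) :
    PySem.List.sorted (h :: t) (fun p => p.2) =
      (extractMin h t).1 :: PySem.List.sorted (extractMin h t).2 (fun p => p.2) := by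
  induction t using List.reverseRecOn generalizing h with
  | nil => simp [extractMin, PySem.List.sorted_eq_foldl_insertBy, PySem.List.insertBy]
  | append_singleton ys x ih =>
    rw [extractMin_append, show h :: (ys ++ [x]) = (h :: ys) ++ [x] from rfl, sorted_snoc,
      ih h]
    by_cases hc : x.2 < (extractMin h ys).1.2
    · simp only [hc, if_true, PySem.List.insertBy, hc, decide_true, if_pos]
      rw [← ih h]
    · simp only [hc, if_false, PySem.List.insertBy, decide_eq_true_eq, sorted_snoc]

-- a fold whose body ignores the list element iterates the selection step
theorem foldl_const_iterate (l : List Int) (init : List (String × Int) × List (String × Int)) :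
    l.foldl (fun st _ => selStep st) init = selStep^[l.length] init := by
  induction l generalizing init with
  | nil => simp
  | cons x xs ih => rw [List.foldl_cons, ih, List.length_cons, Function.iterate_succ_apply]

-- n selection rounds accumulate the first n elements of the stable sort
theorem iterate_selStep (n : Nat) :
    ∀ (l acc : List (String × Int)),
      (selStep^[n] (acc, l)).1 = acc ++ (PySem.List.sorted l (fun p => p.2)).take n := by
  induction n with
  | zero => intro l acc; simp
  | succ k ih =>
    intro l acc
    rw [Function.iterate_succ_apply]
    cases l with
    | nil =>
      have : selStep (acc, ([] : List (String × Int))) = (acc, []) := rfl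
      rw [this, ih [] acc]; simp [PySem.List.sorted]
    | cons h t =>
      have : selStep (acc, h :: t) = (acc ++ [(extractMin h t).1], (extractMin h t).2) := rfl
      rw [this, ih (extractMin h t).2 (acc ++ [(extractMin h t).1]),
        sorted_eq_extractMin, List.take_succ_cons, List.append_assoc]
      rfl

-- B's picks are the first three entries of A's sorted scores
theorem picks_eq_take_sorted (pairs : List (String × Int)) :
    ((PySem.List.pyRange 0 3 1).foldl
      (fun (st : List (String × Int) × List (String × Int)) _ =>
        match st.2 with
        | [] => st
        | h :: t => let mr := extractMin h t; (st.1 ++ [mr.1], mr.2)) ([], pairs)).1 =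
      (PySem.List.sorted pairs (fun p => p.2)).take 3 := by
  have h := foldl_const_iterate (PySem.List.pyRange 0 3 1) ([], pairs)
  have hlen : (PySem.List.pyRange 0 3 1).length = 3 := by decide
  rw [hlen] at h
  show (List.foldl (fun st _ => selStep st) ([], pairs) (PySem.List.pyRange 0 3 1)).1 = _
  rw [h]
  simpa using iterate_selStep 3 pairs []

-- ===== VERDICT (by name: the statement is the Claim_ definition above) =====
theorem suggest_column_name_py_spec : Claim_equal_suggest_column_name_py := by
  intro column_name available_columns _
  unfold Spec_suggest_column_name_py suggest_column_name_py suggest_column_name_py_alt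
  by_cases hne : available_columns = []
  · subst hne
    rw [if_pos rfl, if_pos rfl]
    rw [show ("' does not exist. No columns are available in this context." : String) =
      "' does not exist. " ++ "No columns are available in this context." from rfl]
    simp only [String.append_assoc]
  · rw [if_neg hne, if_neg hne]
    dsimp only
    rw [picks_eq_take_sorted]
    have hsne : PySem.List.sorted (available_columns.map (fun col =>
        (col, levenshtein (PySem.Chars.lower column_name.toList) (PySem.Chars.lower col.toList))))
        (fun x => x.2) ≠ [] := by
      rw [Ne, PySem.List.sorted_eq_nil_iff, List.map_eq_nil_iff]; exact hne
    obtain ⟨m, t, hmt⟩ := List.exists_cons_of_ne_nil hsne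
    rw [hmt]
    rw [PySem.List.slice_to _ (by norm_num)]
    simp only [List.take_succ_cons, PySem.List.pyGetD_of_nonneg _ _ (by norm_num : (0:Int) ≤ 0),
      Int.toNat_zero, List.getD_cons_zero]
    by_cases hg : m.2 ≤ PySem.Str.len column_name
    · have h3 : (3 : Int).toNat = 3 := rfl
      simp only [hg, decide_true, List.filter_true, List.map_cons, h3, List.take_succ_cons,
        if_true, ne_eq, reduceCtorEq, not_false_eq_true, List.length_cons, List.length_map,
        PySem.List.pyGetD_of_nonneg _ _ (by norm_num : (0:Int) ≤ 0), Int.toNat_zero,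
        List.getD_cons_zero, List.map_map, Function.comp_def]
      split_ifs with h1
      · rw [show ("' does not exist. Did you mean: '" : String) =
          "' does not exist. " ++ "Did you mean: '" from rfl]
        simp only [String.append_assoc]
      · rw [show ("' does not exist. Did you mean one of: " : String) =
          "' does not exist. " ++ "Did you mean one of: " from rfl]
        simp only [String.append_assoc]
    · simp only [hg, decide_false, List.filter_false, List.map_nil, ne_eq, not_true_eq_false,
        if_false]
      rw [show ("' does not exist. Available columns: " : String) =
        "' does not exist. " ++ "Available columns: " from rfl]
      simp only [String.append_assoc]
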